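-- pv_equiv track=rewrite | github.com/redlitmus-in/MeterSquare | backend/utils/skill_matcher.py | skill_matches
-- ===== SOURCE A (Python) =====
-- def extract_base_skill(skill_name):
--     """
--     Extract base skill from full role name
--
--     Examples:
--       "Carpenter - Professional" → "Carpenter"
--       "Mason - Professional" → "Mason"
--       "Electrician - Certified" → "Electrician"
--       "General Helper - Standard" → "Helper"
--       "Carpenter" → "Carpenter" (already base)
--     """
--     if not skill_name:
--         return None
--
--     # Split by " - " and take first part
--     parts = skill_name.split(' - ')
--     base = parts[0].strip()
--
--     # Handle special cases
--     if base.lower().startswith('general '):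
--         # "General Helper" → "Helper"
--         return base.split(' ', 1)[1] if ' ' in base else base
--
--     return base
--
-- def skill_matches(required_skill, worker_skills):
--     """
--     Check if worker skills match the required skill
--
--     Uses flexible matching:
--     - Exact match: "Carpenter" matches ["Carpenter"]
--     - Base match: "Carpenter - Professional" matches ["Carpenter"]
--     - Professional match: "Carpenter" matches ["Carpenter - Professional"]
--
--     Args:
--         required_skill (str): Skill required by requisition (e.g., "Carpenter - Professional")
--         worker_skills (list): List of skills worker has (e.g., ["Carpenter", "Joinery"])
--
--     Returns:
--         bool: True if there's a match, False otherwise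
--     """
--     if not required_skill or not worker_skills:
--         return False
--
--     # Normalize inputs
--     required_skill = required_skill.strip()
--     worker_skills = [s.strip() for s in worker_skills if s]
--
--     # Extract base skill from required skill
--     required_base = extract_base_skill(required_skill)
--
--     # Check each worker skill
--     for worker_skill in worker_skills:
--         # Extract base from worker skill
--         worker_base = extract_base_skill(worker_skill)
--
--         # Match if:
--         # 1. Exact match: "Carpenter" == "Carpenter"
--         if required_skill.lower() == worker_skill.lower():
--             return True
--
--         # 2. Base match: "Carpenter - Professional" matches "Carpenter"
--         if required_base and required_base.lower() == worker_skill.lower():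
--             return True
--
--         # 3. Base to base match: "Carpenter - Professional" matches "Carpenter - Skilled"
--         if required_base and worker_base and required_base.lower() == worker_base.lower():
--             return True
--
--         # 4. Worker has professional skill, requisition wants base
--         if required_skill.lower() == worker_base.lower():
--             return True
--
--     return False
-- ===== SOURCE B (Python) =====
-- def extract_base_skill(skill_name):
--     if not skill_name:
--         return None
--     parts = skill_name.split(' - ')
--     base = parts[0].strip()
--     if base.lower().startswith('general '):
--         return base.split(' ', 1)[1] if ' ' in base else base
--     return base
--
-- def _tokens(s):
--     """All lowercase forms a skill string stands for: itself, plus its base form if any."""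
--     toks = [s.lower()]
--     b = extract_base_skill(s)
--     if b:
--         toks.append(b.lower())
--     return toks
--
-- def skill_matches(required_skill, worker_skills):
--     if not required_skill or not worker_skills:
--         return False
--     required_skill = required_skill.strip()
--     cleaned = [s.strip() for s in worker_skills if s]
--     # Sort both token vocabularies, then look for a common element with a
--     # two-pointer merge scan over the two sorted deduplicated lists.
--     req = sorted(set(_tokens(required_skill)))
--     wrk = sorted({t for w in cleaned for t in _tokens(w)})
--     i = j = 0
--     while i < len(req) and j < len(wrk):
--         if req[i] == wrk[j]:
--             return True
--         if req[i] < wrk[j]: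
--             i += 1
--         else:
--             j += 1
--     return False
-- ===== Notes on version B (the rewrite author's own statement) =====
-- stated objective: alternative
-- what changed: A's single pass with a four-way branch cascade per worker skill is replaced by a sort-then-merge algorithm: both token vocabularies (each skill plus its truthy base, lowercased, deduplicated) are sorted and a two-pointer merge scan over the two sorted lists decides whether they share an element.
-- outside the precondition, e.g. on skill_matches('x', [' ']): A raises AttributeError, B returns False; on skill_matches('a', ['a', ' ']): A returns True, B returns True; on skill_matches(' ', [' ']): A returns True, B returns True
import Mathlib
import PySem

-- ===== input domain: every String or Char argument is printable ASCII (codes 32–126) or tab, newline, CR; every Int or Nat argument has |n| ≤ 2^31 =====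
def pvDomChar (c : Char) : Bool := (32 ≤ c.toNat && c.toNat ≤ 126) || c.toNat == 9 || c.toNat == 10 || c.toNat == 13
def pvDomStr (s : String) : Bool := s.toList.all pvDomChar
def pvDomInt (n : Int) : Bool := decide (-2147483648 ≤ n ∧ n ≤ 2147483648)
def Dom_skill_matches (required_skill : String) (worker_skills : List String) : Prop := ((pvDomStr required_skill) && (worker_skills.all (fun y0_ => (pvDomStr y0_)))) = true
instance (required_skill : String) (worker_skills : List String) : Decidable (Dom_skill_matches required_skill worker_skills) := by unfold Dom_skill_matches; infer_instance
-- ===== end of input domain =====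

-- B replaces A's per-worker four-way branch cascade with a sort-then-merge algorithm over the two
-- token vocabularies (objective: alternative). Return-value equivalence only; no argument is mutated.

-- ===== PORT A =====
-- shared helper: A's extract_base_skill (Source B contains the identical function)
def extract_base_skill (skill_name : String) : Option String :=
  if skill_name = "" then none
  else
    let parts := (PySem.Str.split? skill_name " - ").getD []   -- split? is some: the separator " - " is nonempty
    let base := PySem.Str.strip (parts.headD "")   -- parts[0]; split never returns an empty list
    if PySem.Str.startswith (PySem.Str.lower base) "general " then
      if PySem.Str.isIn " " base then
        -- base.split(' ', 1)[1]; the index exists because ' ' ∈ base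
        some (((PySem.Str.splitMax? base " " 1).getD []).getD 1 "")
      else some base
    else some base

def skill_matches_loop (rs : String) (rb : Option String) : List String → Bool
  | [] => false
  | w :: rest =>
    let wb := extract_base_skill w
    if PySem.Str.lower rs = PySem.Str.lower w then true
    else if rb.any (fun b => b != "" && (PySem.Str.lower b == PySem.Str.lower w)) then true
    else if rb.any (fun b => b != "" && wb.any (fun c => c != "" && (PySem.Str.lower b == PySem.Str.lower c))) then true
    -- Python's 4th branch calls worker_base.lower(); when wb = none Python raises AttributeError (excluded by Pre_)
    else if wb.any (fun c => PySem.Str.lower rs == PySem.Str.lower c) then true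
    else skill_matches_loop rs rb rest

def skill_matches (required_skill : String) (worker_skills : List String) : Bool :=
  if required_skill = "" || worker_skills.isEmpty then false
  else
    let rs := PySem.Str.strip required_skill
    let cleaned := (worker_skills.filter (fun s => s != "")).map PySem.Str.strip
    skill_matches_loop rs (extract_base_skill rs) cleaned

-- ===== PORT B =====
-- Source B's _tokens: the lowercase forms a skill stands for
def tokensB (s : String) : List String :=
  let toks := [PySem.Str.lower s]
  match extract_base_skill s with
  | some b => if b ≠ "" then toks ++ [PySem.Str.lower b] else toks
  | none => toks

-- Source B's while loop: two-pointer merge scan over two sorted lists (the suffixes from i and j)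
def mergeHas : List String → List String → Bool
  | [], _ => false
  | _, [] => false
  | a :: as_, b :: bs =>
    if a = b then true
    else if a < b then mergeHas as_ (b :: bs)
    else mergeHas (a :: as_) bs
termination_by l1 l2 => l1.length + l2.length

def skill_matches_alt (required_skill : String) (worker_skills : List String) : Bool :=
  if required_skill = "" || worker_skills.isEmpty then false
  else
    let rs := PySem.Str.strip required_skill
    let cleaned := (worker_skills.filter (fun s => s != "")).map PySem.Str.strip
    let req := PySem.List.sorted (PySem.Set.ofList (tokensB rs)) (fun x => x) false
    let wrk := PySem.List.sorted (PySem.Set.ofList (cleaned.flatMap tokensB)) (fun x => x) false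
    mergeHas req wrk

-- ===== PRECONDITION & SPEC =====
-- Pre_ excludes whitespace-only (nonempty) strings: as a worker entry such a string makes A raise
-- AttributeError (extract_base_skill returns None and branch 4 calls None.lower()) unless an earlier
-- entry already matched, and as required_skill it normalises to the empty skill, whose matches against
-- equally degenerate entries are accidental.
def Pre_skill_matches (required_skill : String) (worker_skills : List String) : Prop :=
  (required_skill = "" ∨ PySem.Str.strip required_skill ≠ "") ∧
  ∀ s ∈ worker_skills, s = "" ∨ PySem.Str.strip s ≠ ""
instance (required_skill : String) (worker_skills : List String) : Decidable (Pre_skill_matches required_skill worker_skills) := by unfold Pre_skill_matches; infer_instance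

def pvWitness_skill_matches : String × List String := ("Carpenter - Professional", ["Carpenter", "Joinery"])

def Spec_skill_matches (required_skill : String) (worker_skills : List String) (out : Bool) : Prop := out = skill_matches_alt required_skill worker_skills
instance (required_skill : String) (worker_skills : List String) (out : Bool) : Decidable (Spec_skill_matches required_skill worker_skills out) := by unfold Spec_skill_matches; infer_instance

-- ===== CLAIM (what is proved, stated in full; the proofs are below) =====
def Claim_equal_skill_matches : Prop := ∀ (required_skill : String) (worker_skills : List String), Dom_skill_matches required_skill worker_skills → Pre_skill_matches required_skill worker_skills → Spec_skill_matches required_skill worker_skills (skill_matches required_skill worker_skills)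

-- ===== LEMMAS AND PROOFS =====

-- a nonempty skill always has a base skill
theorem extract_base_skill_isSome (w : String) (hw : w ≠ "") :
    ∃ b, extract_base_skill w = some b := by
  unfold extract_base_skill
  rw [if_neg hw]
  dsimp only
  split_ifs <;> exact ⟨_, rfl⟩

-- lower maps only the empty string to the empty string
theorem lower_eq_empty_iff (s : String) : PySem.Str.lower s = "" ↔ s = "" := by
  rw [← String.toList_inj]
  simp [PySem.Chars.lower]

-- A's loop is an existential scan over the cleaned worker skills
theorem skill_matches_loop_eq_true (rs : String) (rb : Option String) (l : List String) :
    skill_matches_loop rs rb l = true ↔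
      ∃ w ∈ l,
        (PySem.Str.lower rs = PySem.Str.lower w) ∨
        (rb.any (fun b => b != "" && (PySem.Str.lower b == PySem.Str.lower w)) = true) ∨
        (rb.any (fun b => b != "" && (extract_base_skill w).any (fun c => c != "" && (PySem.Str.lower b == PySem.Str.lower c))) = true) ∨
        ((extract_base_skill w).any (fun c => PySem.Str.lower rs == PySem.Str.lower c) = true) := by
  induction l with
  | nil => simp [skill_matches_loop]
  | cons w rest ih =>
    simp only [skill_matches_loop, List.mem_cons, exists_eq_or_imp]
    split_ifs with h1 h2 h3 h4 <;> simp_all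

-- the merge scan on two strictly increasing lists decides whether they share an element
theorem mergeHas_eq_true (l1 l2 : List String) :
    l1.Pairwise (· < ·) → l2.Pairwise (· < ·) →
    (mergeHas l1 l2 = true ↔ ∃ x ∈ l1, x ∈ l2) := by
  fun_induction mergeHas l1 l2 with
  | case1 l2 =>
    intro _ _
    simp
  | case2 l1 h =>
    intro _ _
    simp
  | case3 as_ b bs =>
    intro _ _
    simp
  | case4 a as_ b bs hne hlt ih =>
    intro h1 h2
    rw [ih (List.Pairwise.of_cons h1) h2]
    have ha : a ∉ b :: bs := by
      intro hmem
      rcases List.mem_cons.mp hmem with rfl | hmem'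
      · exact lt_irrefl a hlt
      · exact lt_irrefl a (hlt.trans ((List.pairwise_cons.mp h2).1 a hmem'))
    simp only [List.mem_cons, exists_eq_or_imp]
    constructor
    · exact Or.inr
    · rintro (hx | hx)
      · exact absurd (List.mem_cons.mpr (by tauto)) ha
      · exact hx
  | case5 a as_ b bs hne hnlt ih =>
    intro h1 h2
    have hba : b < a := lt_of_le_of_ne (not_lt.mp hnlt) (Ne.symm hne)
    rw [ih h1 (List.Pairwise.of_cons h2)]
    have hb : b ∉ a :: as_ := by
      intro hmem
      rcases List.mem_cons.mp hmem with rfl | hmem'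
      · exact lt_irrefl b hba
      · exact lt_irrefl b (hba.trans ((List.pairwise_cons.mp h1).1 b hmem'))
    constructor
    · rintro ⟨x, hx1, hx2⟩
      exact ⟨x, hx1, List.mem_cons.mpr (Or.inr hx2)⟩
    · rintro ⟨x, hx1, hx2⟩
      rcases List.mem_cons.mp hx2 with rfl | hx2'
      · exact absurd hx1 hb
      · exact ⟨x, hx1, hx2'⟩

-- membership in Source B's token list
theorem mem_tokensB (w x : String) :
    x ∈ tokensB w ↔ x = PySem.Str.lower w ∨
      ∃ b, extract_base_skill w = some b ∧ b ≠ "" ∧ x = PySem.Str.lower b := by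
  unfold tokensB
  dsimp only
  cases hb : extract_base_skill w with
  | none => simp
  | some b => by_cases hbe : b = "" <;> simp [hbe]

-- the two ports agree on every input admitted by Pre_
theorem skill_matches_eq_alt (required_skill : String) (worker_skills : List String)
    (hpre : (required_skill = "" ∨ PySem.Str.strip required_skill ≠ "") ∧
      ∀ s ∈ worker_skills, s = "" ∨ PySem.Str.strip s ≠ "") :
    skill_matches required_skill worker_skills = skill_matches_alt required_skill worker_skills := by
  unfold skill_matches skill_matches_alt
  by_cases hg : (required_skill = "" || worker_skills.isEmpty) = true
  · rw [if_pos hg, if_pos hg]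
  · rw [if_neg hg, if_neg hg]
    dsimp only
    simp only [Bool.or_eq_true, decide_eq_true_eq, List.isEmpty_iff, not_or] at hg
    obtain ⟨hreq, -⟩ := hg
    have hR : PySem.Str.strip required_skill ≠ "" := hpre.1.resolve_left hreq
    set R := PySem.Str.strip required_skill with hRdef
    have hlR : PySem.Str.lower R ≠ "" := fun h => hR ((lower_eq_empty_iff R).mp h)
    obtain ⟨b0, hb0⟩ := extract_base_skill_isSome R hR
    set cleaned := (worker_skills.filter (fun s => s != "")).map PySem.Str.strip with hcldef
    have hcl : ∀ w ∈ cleaned, w ≠ "" := by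
      intro w hw
      rw [hcldef] at hw
      simp only [List.mem_map, List.mem_filter, bne_iff_ne, ne_eq] at hw
      obtain ⟨s, ⟨hs, hs0⟩, rfl⟩ := hw
      exact (hpre.2 s hs).resolve_left hs0
    rw [Bool.eq_iff_iff]
    rw [skill_matches_loop_eq_true]
    rw [mergeHas_eq_true _ _ (PySem.List.sorted_ofList_pairwise_lt _)
      (PySem.List.sorted_ofList_pairwise_lt _)]
    simp only [PySem.List.mem_sorted, PySem.Set.mem_ofList, List.mem_flatMap, mem_tokensB]
    constructor
    · rintro ⟨w, hw, hcond⟩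
      obtain ⟨c, hc⟩ := extract_base_skill_isSome w (hcl w hw)
      simp only [hb0, hc, Option.any_some, Bool.and_eq_true, bne_iff_ne, ne_eq, beq_iff_eq] at hcond
      rcases hcond with h1 | ⟨hb0ne, h2⟩ | ⟨hb0ne, hcne, h3⟩ | h4
      · exact ⟨PySem.Str.lower R, Or.inl rfl, ⟨w, hw, Or.inl h1⟩⟩
      · exact ⟨PySem.Str.lower b0, Or.inr ⟨b0, hb0, hb0ne, rfl⟩, ⟨w, hw, Or.inl h2⟩⟩
      · exact ⟨PySem.Str.lower b0, Or.inr ⟨b0, hb0, hb0ne, rfl⟩,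
          ⟨w, hw, Or.inr ⟨c, hc, hcne, h3⟩⟩⟩
      · by_cases hc0 : c = ""
        · exact absurd (h4.trans (by simp [hc0, lower_eq_empty_iff])) hlR
        · exact ⟨PySem.Str.lower R, Or.inl rfl, ⟨w, hw, Or.inr ⟨c, hc, hc0, h4⟩⟩⟩
    · rintro ⟨x, hx, w, hw, htok⟩
      refine ⟨w, hw, ?_⟩
      obtain ⟨c, hc⟩ := extract_base_skill_isSome w (hcl w hw)
      simp only [hb0, hc, Option.any_some, Bool.and_eq_true, bne_iff_ne, ne_eq, beq_iff_eq]
      rcases hx with rfl | ⟨b', hb', hb'ne, rfl⟩ <;> rcases htok with h | ⟨c', hc', hc'ne, h⟩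
      · exact Or.inl h
      · rw [hc'] at hc; cases hc; exact Or.inr (Or.inr (Or.inr h))
      · rw [hb'] at hb0; cases hb0; exact Or.inr (Or.inl ⟨hb'ne, h⟩)
      · rw [hb'] at hb0; cases hb0; rw [hc'] at hc; cases hc
        exact Or.inr (Or.inr (Or.inl ⟨hb'ne, hc'ne, h⟩))

-- ===== VERDICT (by name: the statement is the Claim_ definition above) =====
theorem skill_matches_spec : Claim_equal_skill_matches := by
  intro required_skill worker_skills _ hpre
  unfold Pre_skill_matches at hpre
  unfold Spec_skill_matches
  exact skill_matches_eq_alt required_skill worker_skills hpre
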